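-- pv_equiv track=rewrite | github.com/IsaacRay/automatic | app/intent_router.py | _keyword_prefilter
-- ===== SOURCE A (Python) =====
-- def _keyword_prefilter(search_text: str, items: list[dict], stop_words: frozenset) -> dict | None:
--     """Match items by keyword overlap in label/message before resorting to GPT.
--
--     Returns the best item if one clearly wins, otherwise None (fall back to GPT).
--     """
--     words = [w.lower() for w in search_text.split() if w.lower() not in stop_words and len(w) > 1]
--     if not words:
--         return None
--
--     scores = []
--     for item in items:
--         searchable = f"{item.get('label', '')} {item.get('message', '')}".lower()
--         hits = sum(1 for w in words if w in searchable)
--         scores.append((hits, item))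
--
--     scores.sort(key=lambda x: x[0], reverse=True)
--
--     if scores[0][0] == 0:
--         return None  # no keyword hits at all
--
--     # Clear winner: top match has strictly more hits than runner-up
--     if len(scores) == 1 or scores[0][0] > scores[1][0]:
--         return scores[0][1]
--
--     return None  # ambiguous — let GPT decide
-- ===== SOURCE B (Python) =====
-- def _keyword_prefilter(search_text: str, items: list[dict], stop_words: frozenset) -> dict | None:
--     """One-pass leader scan: track the best-scoring item and whether the lead is tied,
--     instead of building and sorting a score list."""
--     words = [w.lower() for w in search_text.split() if w.lower() not in stop_words and len(w) > 1]
--     if not words: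
--         return None
--
--     best_hits = -1
--     best_item = None
--     tied = False
--     for item in items:
--         searchable = f"{item.get('label', '')} {item.get('message', '')}".lower()
--         hits = sum(1 for w in words if w in searchable)
--         if hits > best_hits:
--             best_hits, best_item, tied = hits, item, False
--         elif hits == best_hits:
--             tied = True
--
--     if best_hits <= 0 or tied:
--         return None
--     return best_item
-- ===== Notes on version B (the rewrite author's own statement) =====
-- stated objective: simpler
-- what changed: Replaces the build-score-list-then-stable-sort-and-compare-top-two approach by a single left-to-right scan that tracks the current best item, its hit count and a tie flag, so no score list is materialised and no sort is performed.
import Mathlib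
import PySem

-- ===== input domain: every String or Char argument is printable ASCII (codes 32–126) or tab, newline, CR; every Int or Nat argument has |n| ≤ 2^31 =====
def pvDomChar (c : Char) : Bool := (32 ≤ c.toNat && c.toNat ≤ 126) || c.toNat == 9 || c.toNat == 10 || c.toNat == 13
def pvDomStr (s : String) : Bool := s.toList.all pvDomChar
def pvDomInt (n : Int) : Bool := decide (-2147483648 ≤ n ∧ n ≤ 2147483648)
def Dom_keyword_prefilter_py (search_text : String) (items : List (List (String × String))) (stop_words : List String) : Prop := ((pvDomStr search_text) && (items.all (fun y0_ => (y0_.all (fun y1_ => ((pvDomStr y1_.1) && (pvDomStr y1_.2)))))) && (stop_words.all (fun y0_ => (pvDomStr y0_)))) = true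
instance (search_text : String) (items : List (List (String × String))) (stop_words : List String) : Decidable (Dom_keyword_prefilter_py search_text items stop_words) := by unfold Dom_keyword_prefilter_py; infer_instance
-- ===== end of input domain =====

-- B replaces A's build-score-list-then-stable-sort-and-inspect-top-two by a single scan
-- tracking the best item, its hit count and a tie flag (objective: simpler; return value only).

-- shared helpers: both Pythons compute the keyword list and the per-item hit count by the
-- same expressions, so they are shared here.
def pvWords (search_text : String) (stop_words : List String) : List String :=
  ((PySem.Str.split₀ search_text).filter
    (fun w => !(stop_words.contains (PySem.Str.lower w)) && decide (1 < PySem.Str.len w))).map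
    (fun w => PySem.Str.lower w)

def pvHits (words : List String) (item : List (String × String)) : Int :=
  let searchable := PySem.Chars.lower
    (((PySem.Dict.mk item).getD "label" "").toList ++ ' ' :: ((PySem.Dict.mk item).getD "message" "").toList)
  (words.countP (fun w => PySem.Chars.isIn w.toList searchable) : Int)

-- ===== PORT A =====
def keyword_prefilter_py (search_text : String) (items : List (List (String × String))) (stop_words : List String) : Option (List (String × String)) :=
  let words := pvWords search_text stop_words
  if words = [] then none
  else
    let scores := items.map (fun item => (pvHits words item, item))
    let sortedScores := PySem.List.sorted scores (fun x => x.1) true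
    match sortedScores with
    | [] => none   -- Python raises IndexError on scores[0] here; excluded by Pre_
    | s0 :: rest =>
      if s0.1 = 0 then none
      else
        match rest with
        | [] => some s0.2
        | r0 :: _ => if s0.1 > r0.1 then some s0.2 else none

-- ===== PORT B =====
def keyword_prefilter_py_alt (search_text : String) (items : List (List (String × String))) (stop_words : List String) : Option (List (String × String)) :=
  let words := pvWords search_text stop_words
  if words = [] then none
  else
    let r := items.foldl
      (fun (acc : Int × Option (List (String × String)) × Bool) item =>
        let hits := pvHits words item
        if hits > acc.1 then (hits, some item, false)
        else if hits = acc.1 then (acc.1, acc.2.1, true)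
        else acc)
      (-1, none, false)
    if decide (r.1 ≤ 0) || r.2.2 then none else r.2.1

-- ===== PRECONDITION & SPEC =====
-- Pre_ excludes exactly the inputs where A raises IndexError: empty items with a nonempty keyword list.
def Pre_keyword_prefilter_py (search_text : String) (items : List (List (String × String))) (stop_words : List String) : Prop :=
  items ≠ [] ∨ pvWords search_text stop_words = []
instance (search_text : String) (items : List (List (String × String))) (stop_words : List String) : Decidable (Pre_keyword_prefilter_py search_text items stop_words) := by unfold Pre_keyword_prefilter_py; infer_instance

def pvWitness_keyword_prefilter_py : String × (List (List (String × String))) × List String :=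
  ("cat", [[("label", "cat")]], [])

def Spec_keyword_prefilter_py (search_text : String) (items : List (List (String × String))) (stop_words : List String) (out : Option (List (String × String))) : Prop := out = keyword_prefilter_py_alt search_text items stop_words
instance (search_text : String) (items : List (List (String × String))) (stop_words : List String) (out : Option (List (String × String))) : Decidable (Spec_keyword_prefilter_py search_text items stop_words out) := by unfold Spec_keyword_prefilter_py; infer_instance

-- ===== CLAIM (what is proved, stated in full; the proofs are below) =====
def Claim_equal_keyword_prefilter_py : Prop := ∀ (search_text : String) (items : List (List (String × String))) (stop_words : List String), Dom_keyword_prefilter_py search_text items stop_words → Pre_keyword_prefilter_py search_text items stop_words → Spec_keyword_prefilter_py search_text items stop_words (keyword_prefilter_py search_text items stop_words)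

-- ===== LEMMAS AND PROOFS =====

-- the running maximum of the score keys, with B's initial value -1
def pvM {α : Type} (l : List (Int × α)) : Int := l.foldl (fun m p => max m p.1) (-1)

theorem pvM_append {α : Type} (l : List (Int × α)) (x : Int × α) :
    pvM (l ++ [x]) = max (pvM l) x.1 := by
  simp [pvM, List.foldl_append]

theorem le_pvM {α : Type} (l : List (Int × α)) (p : Int × α) (hp : p ∈ l) : p.1 ≤ pvM l := by
  induction l using List.reverseRecOn with
  | nil => simp at hp
  | append_singleton l x ih =>
    rw [pvM_append]
    rcases List.mem_append.1 hp with h | h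
    · exact le_trans (ih h) (le_max_left _ _)
    · simp at h; subst h; exact le_max_right _ _

theorem pvM_le {α : Type} (l : List (Int × α)) (c : Int) (hc : -1 ≤ c)
    (h : ∀ p ∈ l, p.1 ≤ c) : pvM l ≤ c := by
  induction l using List.reverseRecOn with
  | nil => simpa [pvM] using hc
  | append_singleton l x ih =>
    rw [pvM_append]
    exact max_le (ih fun p hp => h p (List.mem_append_left _ hp)) (h x (by simp))

theorem pvM_attained {α : Type} (l : List (Int × α)) (hpos : ∀ p ∈ l, 0 ≤ p.1)
    (hne : l ≠ []) : ∃ p ∈ l, p.1 = pvM l := by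
  induction l using List.reverseRecOn with
  | nil => exact absurd rfl hne
  | append_singleton l x ih =>
    rw [pvM_append]
    rcases eq_or_ne l [] with rfl | hl
    · refine ⟨x, by simp, ?_⟩
      have := hpos x (by simp)
      simp [pvM]; omega
    · rcases ih (fun p hp => hpos p (List.mem_append_left _ hp)) hl with ⟨p, hp, hpe⟩
      rcases le_or_gt x.1 (pvM l) with h | h
      · exact ⟨p, List.mem_append_left _ hp, by rw [hpe, max_eq_left h]⟩
      · exact ⟨x, by simp, by rw [max_eq_right (le_of_lt h)]⟩

-- find?: the unique satisfier is found
theorem find?_of_countP_eq_one {α : Type} (q : α → Bool) (l : List α) (a : α)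
    (h1 : l.countP q = 1) (ha : a ∈ l) (hq : q a = true) : l.find? q = some a := by
  induction l with
  | nil => simp at ha
  | cons x xs ih =>
    by_cases hx : q x = true
    · rw [List.find?_cons_of_pos hx]
      rcases List.mem_cons.1 ha with rfl | ha
      · rfl
      · exfalso
        have : 1 ≤ xs.countP q := List.one_le_countP_iff.2 ⟨a, ha, hq⟩
        rw [List.countP_cons_of_pos hx] at h1; omega
    · rw [List.find?_cons_of_neg (by simpa using hx)]
      rw [List.countP_cons_of_neg (by simpa using hx)] at h1
      rcases List.mem_cons.1 ha with rfl | ha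
      · exact absurd hq hx
      · exact ih h1 ha

-- B's fold characterised: running max, first argmax, and whether the max is tied
theorem foldB_char {α : Type} (l : List (Int × α)) (hpos : ∀ p ∈ l, 0 ≤ p.1) (hne : l ≠ []) :
    l.foldl
      (fun (acc : Int × Option α × Bool) p =>
        if p.1 > acc.1 then (p.1, some p.2, false)
        else if p.1 = acc.1 then (acc.1, acc.2.1, true)
        else acc)
      (-1, none, false)
    = (pvM l, (l.find? (fun p => p.1 == pvM l)).map (·.2),
       decide (2 ≤ l.countP (fun p => p.1 == pvM l))) := by
  induction l using List.reverseRecOn with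
  | nil => exact absurd rfl hne
  | append_singleton l x ih =>
    rcases eq_or_ne l [] with rfl | hl
    · have hx := hpos x (by simp)
      simp [pvM, show (-1:Int) < x.1 by omega, show (-1:Int) ≤ x.1 by omega]
    · have hposl : ∀ p ∈ l, 0 ≤ p.1 := fun p hp => hpos p (List.mem_append_left _ hp)
      rw [List.foldl_append, ih hposl hl, pvM_append]
      rcases pvM_attained l hposl hl with ⟨w, hw, hwe⟩
      rcases lt_trichotomy (pvM l) x.1 with h | h | h
      · -- new strict maximum: x wins alone
        have hnol : ∀ p ∈ l, ¬ (p.1 == x.1) = true := by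
          intro p hp hpe
          have := le_pvM l p hp
          simp at hpe; omega
        rw [max_eq_right (le_of_lt h)]
        simp only [List.foldl]
        rw [if_pos (show x.1 > pvM l from h)]
        rw [List.find?_append, List.countP_append]
        rw [List.find?_eq_none.2 hnol, List.countP_eq_zero.2 hnol]
        simp
      · -- equal: tie on the current maximum
        have hfs : (l.find? (fun p => p.1 == pvM l)).isSome :=
          List.find?_isSome.mpr ⟨w, hw, by simp [hwe]⟩
        obtain ⟨v, hv⟩ := Option.isSome_iff_exists.1 hfs
        have hcnt : 1 ≤ l.countP (fun p => p.1 == pvM l) :=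
          List.one_le_countP_iff.2 ⟨w, hw, by simp [hwe]⟩
        have hxc : List.countP (fun p => p.1 == pvM l) [x] = 1 := by simp [← h]
        rw [max_eq_left (le_of_eq h.symm)]
        simp only [List.foldl]
        rw [if_neg (by omega), if_pos h.symm]
        rw [List.find?_append, List.countP_append, hv, hxc, Option.some_or]
        have h2 : 2 ≤ List.countP (fun p => p.1 == pvM l) l + 1 := by omega
        simp [h2]
      · -- smaller: nothing changes
        have hfs : (l.find? (fun p => p.1 == pvM l)).isSome :=
          List.find?_isSome.mpr ⟨w, hw, by simp [hwe]⟩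
        obtain ⟨v, hv⟩ := Option.isSome_iff_exists.1 hfs
        have hxc : List.countP (fun p => p.1 == pvM l) [x] = 0 := by simp; omega
        rw [max_eq_left (le_of_lt h)]
        simp only [List.foldl]
        rw [if_neg (by omega), if_neg (by omega)]
        rw [List.find?_append, List.countP_append, hv, hxc, Option.some_or]
        simp

-- proof-side name for A's inspection of the sorted score list (defeq to the port's match)
def pickTop {α : Type} : List (Int × α) → Option α
  | [] => none
  | s0 :: rest =>
    if s0.1 = 0 then none
    else
      match rest with
      | [] => some s0.2
      | r0 :: _ => if s0.1 > r0.1 then some s0.2 else none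

-- A's sort-and-inspect characterised the same way
theorem sortA_char {α : Type} (scores : List (Int × α)) (hpos : ∀ p ∈ scores, 0 ≤ p.1)
    (hne : scores ≠ []) :
    pickTop (PySem.List.sorted scores (fun x => x.1) true)
    = (if decide (pvM scores ≤ 0) || decide (2 ≤ scores.countP (fun p => p.1 == pvM scores))
       then none
       else (scores.find? (fun p => p.1 == pvM scores)).map (·.2) : Option α) := by
  rcases hs : PySem.List.sorted scores (fun x => x.1) true with _ | ⟨s0, _ | ⟨r0, t⟩⟩
  · exact absurd ((PySem.List.sorted_eq_nil_iff _ _ _).1 hs) hne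
  · -- singleton sorted list
    have hperm : [s0].Perm scores := hs ▸ PySem.List.sorted_perm scores _ _
    have hs0mem : s0 ∈ scores := hperm.mem_iff.1 (by simp)
    have hub : ∀ y ∈ scores, y.1 ≤ s0.1 := PySem.List.key_head_sorted_rev_ge scores _ hs
    have hM : pvM scores = s0.1 :=
      le_antisymm (pvM_le _ _ (le_trans (by omega) (hpos s0 hs0mem)) hub) (le_pvM _ _ hs0mem)
    have hsc : scores = [s0] := List.perm_singleton.1 hperm.symm
    subst hsc
    simp only [pickTop, hM, List.countP_cons, List.countP_nil, List.find?]
    by_cases h0 : s0.1 = 0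
    · simp [h0]
    · have := hpos s0 (by simp)
      rw [if_neg h0]
      simp
      omega
  · -- at least two elements
    simp only [pickTop]
    have hperm : (s0 :: r0 :: t).Perm scores := hs ▸ PySem.List.sorted_perm scores _ _
    have hs0mem : s0 ∈ scores := hperm.mem_iff.1 (by simp)
    have hub : ∀ y ∈ scores, y.1 ≤ s0.1 := PySem.List.key_head_sorted_rev_ge scores _ hs
    have hM : pvM scores = s0.1 :=
      le_antisymm (pvM_le _ _ (le_trans (by omega) (hpos s0 hs0mem)) hub) (le_pvM _ _ hs0mem)
    have hcp : scores.countP (fun p => p.1 == pvM scores)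
        = (s0 :: r0 :: t).countP (fun p => p.1 == pvM scores) := (hperm.countP_eq _).symm
    have hpw : (s0 :: r0 :: t).Pairwise (fun a b => b.1 ≤ a.1) :=
      hs ▸ PySem.List.sorted_pairwise_rev scores _
    have hr0 : r0.1 ≤ s0.1 := (List.pairwise_cons.1 hpw).1 r0 (by simp)
    have htail : ∀ y ∈ t, y.1 ≤ r0.1 :=
      fun y hy => (List.pairwise_cons.1 (List.pairwise_cons.1 hpw).2).1 y hy
    by_cases h0 : s0.1 = 0
    · rw [if_pos h0, if_pos (by simp [hM, h0])]
    · have hs0pos : 0 < s0.1 := lt_of_le_of_ne (hpos s0 hs0mem) (Ne.symm h0)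
      rw [if_neg h0]
      by_cases hwin : s0.1 > r0.1
      · rw [if_pos hwin]
        have hcnt1 : scores.countP (fun p => p.1 == pvM scores) = 1 := by
          rw [hcp, hM]
          have hz : List.countP (fun p => p.1 == s0.1) (r0 :: t) = 0 := by
            apply List.countP_eq_zero.2
            intro p hp
            have hple : p.1 ≤ r0.1 := by
              rcases List.mem_cons.1 hp with rfl | hp
              · exact le_refl _
              · exact htail p hp
            simp; omega
          rw [List.countP_cons_of_pos (by simp), hz]
        rw [if_neg (by rw [hcnt1, hM]; simp; omega)]
        rw [find?_of_countP_eq_one _ _ s0 hcnt1 hs0mem (by simp [hM])]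
        rfl
      · rw [if_neg hwin]
        have hr0e : r0.1 = s0.1 := le_antisymm hr0 (by omega)
        have h2 : 2 ≤ scores.countP (fun p => p.1 == pvM scores) := by
          rw [hcp, hM]
          simp [hr0e]
        rw [if_pos (by simp; omega)]

-- bridge: B's fold over items is the pair-step fold over the score list
theorem foldB_map (words : List String) (items : List (List (String × String)))
    (init : Int × Option (List (String × String)) × Bool) :
    items.foldl
      (fun (acc : Int × Option (List (String × String)) × Bool) item =>
        let hits := pvHits words item
        if hits > acc.1 then (hits, some item, false)
        else if hits = acc.1 then (acc.1, acc.2.1, true)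
        else acc) init
    = (items.map (fun item => (pvHits words item, item))).foldl
      (fun (acc : Int × Option (List (String × String)) × Bool) p =>
        if p.1 > acc.1 then (p.1, some p.2, false)
        else if p.1 = acc.1 then (acc.1, acc.2.1, true)
        else acc) init := by
  rw [List.foldl_map]

-- ===== VERDICT (by name: the statement is the Claim_ definition above) =====
theorem keyword_prefilter_py_spec : Claim_equal_keyword_prefilter_py := by
  intro search_text items stop_words _ hpre
  unfold Spec_keyword_prefilter_py keyword_prefilter_py keyword_prefilter_py_alt
  by_cases hw : pvWords search_text stop_words = []
  · simp [hw]
  · simp only [if_neg hw]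
    have hitems : items ≠ [] := by
      rcases hpre with h | h
      · exact h
      · exact absurd h hw
    have hscne : items.map (fun item => (pvHits (pvWords search_text stop_words) item, item)) ≠ [] := by
      simp [hitems]
    have hpos : ∀ p ∈ items.map (fun item => (pvHits (pvWords search_text stop_words) item, item)), 0 ≤ p.1 := by
      intro p hp
      rcases List.mem_map.1 hp with ⟨item, _, rfl⟩
      simp [pvHits]
    rw [foldB_map, foldB_char _ hpos hscne]
    rw [← sortA_char _ hpos hscne]
    rcases PySem.List.sorted (List.map (fun item => (pvHits (pvWords search_text stop_words) item, item)) items)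
      (fun x => x.1) true with _ | ⟨s0, _ | ⟨r0, t⟩⟩ <;> rfl
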